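-- pv_equiv track=rewrite | github.com/ymir-0/hyperoperation | hyperoperation/hyperoperation.py | subAddition
-- ===== SOURCE A (Python) =====
-- def subAddition(numbers):
--     # initiation
--     result=None
--     # do defined operation
--     if numbers[0]==numbers[1]:
--         result=2+numbers[0]
--     elif abs(numbers[0]-numbers[1])>1:
--         result = max(numbers[0], numbers[1]) + 1
--     else:
--         result=max(numbers[0],numbers[1])
--     # continue with extra parameters
--     if len(numbers)>2:
--         result = subAddition(tuple([result] + list(numbers[2:])))
--     # finalisation
--     return result
-- ===== SOURCE B (Python) =====
-- def subAddition(numbers):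
--     result = numbers[0]
--     for b in numbers[1:]:
--         if result == b:
--             result = 2 + result
--         elif abs(result - b) > 1:
--             result = max(result, b) + 1
--         else:
--             result = max(result, b)
--     return result
-- ===== Notes on version B (the rewrite author's own statement) =====
-- stated objective: faster
-- what changed: Replaced the recursion that rebuilds a tuple from a slice at every step with a single iterative left-fold loop over the list, applying the same binary sub-addition step to an accumulator.
import Mathlib
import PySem

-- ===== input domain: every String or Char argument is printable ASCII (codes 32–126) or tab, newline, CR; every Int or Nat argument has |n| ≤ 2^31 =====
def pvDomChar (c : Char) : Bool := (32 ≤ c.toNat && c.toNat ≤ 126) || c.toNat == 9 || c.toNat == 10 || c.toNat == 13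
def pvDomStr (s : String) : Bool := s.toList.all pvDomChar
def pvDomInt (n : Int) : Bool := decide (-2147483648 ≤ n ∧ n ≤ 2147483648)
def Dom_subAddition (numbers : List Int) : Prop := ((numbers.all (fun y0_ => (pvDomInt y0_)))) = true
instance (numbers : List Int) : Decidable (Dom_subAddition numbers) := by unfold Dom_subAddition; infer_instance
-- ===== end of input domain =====

-- B replaces A's recursion-with-slicing (quadratic tuple rebuilds) by a single iterative left fold (O(n)).


-- ===== PORT A =====
-- A: compute the step on numbers[0], numbers[1], then recurse on (result :: numbers[2:]).
-- The `| _ => 0` arm corresponds to inputs where Python raises IndexError (len < 2), excluded by Pre_.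
def subAddition (numbers : List Int) : Int :=
  match numbers with
  | a :: b :: rest =>
    let result : Int :=
      if a = b then 2 + a
      else if |a - b| > 1 then max a b + 1
      else max a b
    if rest.length > 0 then subAddition (result :: rest) else result
  | _ => 0
termination_by numbers.length
decreasing_by simp

-- ===== PORT B =====
-- B: one pass; accumulator starts at numbers[0], folds the step over numbers[1:].
def subStep (r b : Int) : Int :=
  if r = b then 2 + r
  else if |r - b| > 1 then max r b + 1
  else max r b

def subAddition_alt (numbers : List Int) : Int :=
  match numbers with
  | [] => 0
  | a :: rest => rest.foldl subStep a

-- ===== PRECONDITION & SPEC =====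
-- Pre_ excludes lists of length < 2, on which Python A raises IndexError.
def Pre_subAddition (numbers : List Int) : Prop := 2 ≤ numbers.length
instance (numbers : List Int) : Decidable (Pre_subAddition numbers) := by unfold Pre_subAddition; infer_instance
def pvWitness_subAddition : List Int := [3, 3, 7]

def Spec_subAddition (numbers : List Int) (out : Int) : Prop := out = subAddition_alt numbers
instance (numbers : List Int) (out : Int) : Decidable (Spec_subAddition numbers out) := by unfold Spec_subAddition; infer_instance

-- ===== CLAIM (what is proved, stated in full; the proofs are below) =====
def Claim_equal_subAddition : Prop := ∀ (numbers : List Int), Dom_subAddition numbers → Pre_subAddition numbers → Spec_subAddition numbers (subAddition numbers)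

-- ===== LEMMAS AND PROOFS =====
theorem subAddition_eq_foldl (l : List Int) : ∀ (a b : Int),
    subAddition (a :: b :: l) = l.foldl subStep (subStep a b) := by
  induction l with
  | nil =>
    intro a b
    rw [subAddition.eq_def]
    simp [subStep]
  | cons c l ih =>
    intro a b
    rw [subAddition.eq_def]
    simp only [List.length_cons, List.foldl, subStep]
    rw [if_pos (by omega)]
    exact ih _ c

-- ===== VERDICT (by name: the statement is the Claim_ definition above) =====
theorem subAddition_spec : Claim_equal_subAddition := by
  intro numbers _ hpre
  match numbers, hpre with
  | a :: b :: l, _ =>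
    unfold Spec_subAddition subAddition_alt
    exact subAddition_eq_foldl l a b
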